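-- pv_equiv track=rewrite | github.com/LalaOulala/Projets_Code_Elias | PYTHON/calculateurGain/venv/main.py | salaire_DRH
-- ===== SOURCE A (Python) =====
-- def salaire_DRH(année_simulation):
--     gain = 0
--     for i in range(année_simulation):
--         if année_simulation <= 3 : gain = gain + 2452
--         elif année_simulation > 3 and année_simulation <= 5 : gain = gain + 2653
--         elif année_simulation > 5 and année_simulation <= 10 : gain = gain + 2846
--         else : gain = gain + 3131
--     return gain
-- ===== SOURCE B (Python) =====
-- def salaire_DRH(année_simulation):
--     if année_simulation <= 0:
--         return 0
--     if année_simulation <= 3: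
--         taux = 2452
--     elif année_simulation <= 5:
--         taux = 2653
--     elif année_simulation <= 10:
--         taux = 2846
--     else:
--         taux = 3131
--     return année_simulation * taux
-- ===== Notes on version B (the rewrite author's own statement) =====
-- stated objective: faster
-- what changed: The per-year loop (the bracket depends only on the year count, not the loop index) is replaced by a closed form: select the bracket rate once and multiply by the number of years.
import Mathlib
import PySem

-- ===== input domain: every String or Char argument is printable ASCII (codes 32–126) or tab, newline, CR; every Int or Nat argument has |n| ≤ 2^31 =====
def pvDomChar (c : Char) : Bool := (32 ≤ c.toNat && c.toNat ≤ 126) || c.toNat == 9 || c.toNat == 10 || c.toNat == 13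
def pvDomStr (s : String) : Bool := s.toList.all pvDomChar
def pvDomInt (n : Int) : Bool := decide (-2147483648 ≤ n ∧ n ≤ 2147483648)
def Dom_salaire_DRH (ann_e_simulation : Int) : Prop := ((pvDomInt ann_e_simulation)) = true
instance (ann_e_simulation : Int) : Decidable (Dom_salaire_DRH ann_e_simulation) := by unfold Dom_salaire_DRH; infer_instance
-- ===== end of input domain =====

-- B replaces the per-year loop by a closed form (bracket rate × year count); asymptotically faster (O(1) vs O(n)).


-- ===== PORT A =====
def salaire_DRH (ann_e_simulation : Int) : Int :=
  (PySem.List.pyRange 0 ann_e_simulation 1).foldl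
    (fun gain _ =>
      if ann_e_simulation ≤ 3 then gain + 2452
      else if ann_e_simulation > 3 ∧ ann_e_simulation ≤ 5 then gain + 2653
      else if ann_e_simulation > 5 ∧ ann_e_simulation ≤ 10 then gain + 2846
      else gain + 3131) 0

-- ===== PORT B =====
def salaire_DRH_alt (ann_e_simulation : Int) : Int :=
  if ann_e_simulation ≤ 0 then 0
  else
    let taux : Int :=
      if ann_e_simulation ≤ 3 then 2452
      else if ann_e_simulation ≤ 5 then 2653
      else if ann_e_simulation ≤ 10 then 2846
      else 3131
    ann_e_simulation * taux

-- ===== PRECONDITION & SPEC =====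
def Spec_salaire_DRH (ann_e_simulation : Int) (out : Int) : Prop := out = salaire_DRH_alt ann_e_simulation
instance (ann_e_simulation : Int) (out : Int) : Decidable (Spec_salaire_DRH ann_e_simulation out) := by unfold Spec_salaire_DRH; infer_instance

-- ===== CLAIM (what is proved, stated in full; the proofs are below) =====
def Claim_equal_salaire_DRH : Prop := ∀ (ann_e_simulation : Int), Dom_salaire_DRH ann_e_simulation → Spec_salaire_DRH ann_e_simulation (salaire_DRH ann_e_simulation)

-- ===== LEMMAS AND PROOFS =====

-- folding "+ c" over any list from accumulator g adds c * length
theorem foldl_add_const (c : Int) (l : List Int) (g : Int) :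
    l.foldl (fun gain _ => gain + c) g = g + c * l.length := by
  induction l generalizing g with
  | nil => simp
  | cons x xs ih => simp [List.foldl, ih]; ring

theorem salaire_DRH_eq_mul (n : Int) :
    salaire_DRH n =
      (if n ≤ 3 then 2452 else if n ≤ 5 then 2653 else if n ≤ 10 then 2846 else (3131:Int))
        * (n - 0).toNat := by
  unfold salaire_DRH
  split_ifs with h1 h2 h3 <;>
    simp_all [foldl_add_const, PySem.List.length_pyRange_one]

-- ===== VERDICT (by name: the statement is the Claim_ definition above) =====
theorem salaire_DRH_spec : Claim_equal_salaire_DRH := by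
  intro n _
  show salaire_DRH n = salaire_DRH_alt n
  rw [salaire_DRH_eq_mul]
  unfold salaire_DRH_alt
  split_ifs with h0 h1 h2 h3 <;>
    (first | omega | (rw [Int.toNat_of_nonneg (by omega)]; ring))
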